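-- pv_equiv track=rewrite | github.com/garymooney/qmuvi | qmuvi/__init__.py | note_map_f_minor
-- ===== SOURCE A (Python) =====
-- def note_map_f_minor(n):
--     F_MIN = [5, 7, 8, 10, 12, 13, 15, 17, 19, 20, 22, 24, 25, 27, 29, 31, 32, 34, 36, 37, 39, 41, 43, 44, 46, 48,  49, 51, 53, 55, 56, 58, 60, 61, 63, 65, 67,
--              68, 70, 72, 74, 75, 77, 79, 80, 82, 84, 86, 87, 89, 91, 92, 94, 96, 97, 99, 101, 103, 104, 106, 108, 109, 111, 113, 115, 116, 118, 120, 121, 123, 125, 127]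
--     CURR_MODE = F_MIN
--     note = 60+n
--     # Shifting
--     if CURR_MODE and note < CURR_MODE[0]:
--         note = CURR_MODE[0]
--     else:
--         while (CURR_MODE and note not in CURR_MODE):
--             note -= 1
--     return note
-- ===== SOURCE B (Python) =====
-- def note_map_f_minor(n):
--     F_MIN = [5, 7, 8, 10, 12, 13, 15, 17, 19, 20, 22, 24, 25, 27, 29, 31, 32, 34, 36, 37, 39, 41, 43, 44, 46, 48,  49, 51, 53, 55, 56, 58, 60, 61, 63, 65, 67,
--              68, 70, 72, 74, 75, 77, 79, 80, 82, 84, 86, 87, 89, 91, 92, 94, 96, 97, 99, 101, 103, 104, 106, 108, 109, 111, 113, 115, 116, 118, 120, 121, 123, 125, 127]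
--     note = 60 + n
--     for m in reversed(F_MIN):
--         if m <= note:
--             return m
--     return F_MIN[0]
-- ===== Notes on version B (the rewrite author's own statement) =====
-- stated objective: faster
-- what changed: Instead of decrementing the candidate note one integer at a time while testing list membership on each step, B scans the scale list itself once in reverse and returns the first (largest) element <= note, falling back to the lowest scale note.
import Mathlib
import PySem

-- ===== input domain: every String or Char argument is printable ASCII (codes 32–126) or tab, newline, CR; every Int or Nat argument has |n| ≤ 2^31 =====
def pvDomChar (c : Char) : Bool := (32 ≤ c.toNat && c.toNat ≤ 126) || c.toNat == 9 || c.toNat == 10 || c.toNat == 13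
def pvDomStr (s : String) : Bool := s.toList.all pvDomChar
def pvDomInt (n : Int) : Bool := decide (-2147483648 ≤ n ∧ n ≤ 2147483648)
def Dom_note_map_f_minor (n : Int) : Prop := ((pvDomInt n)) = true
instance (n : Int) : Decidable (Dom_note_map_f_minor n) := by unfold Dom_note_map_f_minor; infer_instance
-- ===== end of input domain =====

-- B replaces A's decrement-until-member integer loop by a single reverse scan of the scale list; objective: faster (A walks down one integer at a time, B looks at each scale note once).


-- ===== PORT A =====
def fMin : List Int := [5, 7, 8, 10, 12, 13, 15, 17, 19, 20, 22, 24, 25, 27, 29, 31, 32, 34, 36, 37, 39, 41, 43, 44, 46, 48, 49, 51, 53, 55, 56, 58, 60, 61, 63, 65, 67, 68, 70, 72, 74, 75, 77, 79, 80, 82, 84, 86, 87, 89, 91, 92, 94, 96, 97, 99, 101, 103, 104, 106, 108, 109, 111, 113, 115, 116, 118, 120, 121, 123, 125, 127]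

-- A's while loop: decrement note until it is a member of the scale.  Fuel only makes the
-- recursion total; it is always sufficient on the reachable inputs (note ≥ 5).
def noteLoop : Nat → Int → Int
  | 0, note => note
  | fuel + 1, note => if fMin.contains note then note else noteLoop fuel (note - 1)

def note_map_f_minor (n : Int) : Int :=
  let note := 60 + n
  if note < 5 then 5
  else noteLoop (note - 4).toNat note

-- ===== PORT B =====
-- B's for-loop over reversed(F_MIN): first element ≤ note, else None.
def scanRev : List Int → Int → Option Int
  | [], _ => none
  | m :: rest, note => if m ≤ note then some m else scanRev rest note

def note_map_f_minor_alt (n : Int) : Int :=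
  let note := 60 + n
  match scanRev fMin.reverse note with
  | some m => m
  | none => fMin.headD 0   -- F_MIN[0]; the list is nonempty so the default is never used

-- ===== PRECONDITION & SPEC =====
def Spec_note_map_f_minor (n : Int) (out : Int) : Prop := out = note_map_f_minor_alt n
instance (n : Int) (out : Int) : Decidable (Spec_note_map_f_minor n out) := by unfold Spec_note_map_f_minor; infer_instance

-- ===== CLAIM (what is proved, stated in full; the proofs are below) =====
def Claim_equal_note_map_f_minor : Prop := ∀ (n : Int), Dom_note_map_f_minor n → Spec_note_map_f_minor n (note_map_f_minor n)

-- ===== LEMMAS AND PROOFS =====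

lemma fMin_not_contains_hi (note : Int) (h : 127 < note) : fMin.contains note = false := by
  simp [fMin]
  omega

lemma noteLoop_hi : ∀ (k fuel : Nat), k + 1 ≤ fuel → noteLoop fuel (127 + (k : Int)) = 127 := by
  intro k
  induction k with
  | zero =>
    intro fuel hf
    obtain ⟨f, rfl⟩ : ∃ f, fuel = f + 1 := ⟨fuel - 1, by omega⟩
    simp only [Nat.cast_zero, add_zero, noteLoop]
    rw [if_pos (by decide)]
  | succ k ih =>
    intro fuel hf
    obtain ⟨f, rfl⟩ : ∃ f, fuel = f + 1 := ⟨fuel - 1, by omega⟩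
    have hc : fMin.contains (127 + ((k + 1 : Nat) : Int)) = false :=
      fMin_not_contains_hi _ (by push_cast; omega)
    have h2 : 127 + ((k + 1 : Nat) : Int) - 1 = 127 + (k : Int) := by push_cast; ring
    simp only [noteLoop, hc, Bool.false_eq_true, if_false, h2]
    exact ih f (by omega)

lemma scanRev_hi (note : Int) (h : 127 ≤ note) :
    scanRev fMin.reverse note = some 127 := by
  have hrev : fMin.reverse = 127 :: (fMin.reverse.tail) := by decide
  rw [hrev]
  simp [scanRev, h]

lemma scanRev_lo (note : Int) (h : note < 5) :
    scanRev fMin.reverse note = none := by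
  have : ∀ l : List Int, (∀ m ∈ l, ¬ m ≤ note) → scanRev l note = none := by
    intro l
    induction l with
    | nil => intro _; rfl
    | cons m rest ih =>
      intro hall
      simp [scanRev, hall m (by simp)]
      exact ih fun x hx => hall x (by simp [hx])
  apply this
  intro m hm
  have : 5 ≤ m := by
    revert hm
    have : ∀ x ∈ fMin, (5:Int) ≤ x := by decide
    simpa using fun hm => this m hm
  omega

-- both programs as functions of note = 60 + n
def aVal (note : Int) : Int := if note < 5 then 5 else noteLoop (note - 4).toNat note
def bVal (note : Int) : Int :=
  match scanRev fMin.reverse note with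
  | some m => m
  | none => fMin.headD 0

set_option maxRecDepth 4000 in
lemma mid_eq : ∀ i : Fin 122, aVal (5 + (i : Int)) = bVal (5 + (i : Int)) := by decide

lemma val_eq (note : Int) : aVal note = bVal note := by
  rcases lt_or_ge note 5 with h | h
  · simp only [aVal, bVal, if_pos h, scanRev_lo note h]
    decide
  · rcases lt_or_ge note 127 with h2 | h2
    · have hi : ∃ i : Fin 122, note = 5 + (i : Int) :=
        ⟨⟨(note - 5).toNat, by omega⟩, by simp; omega⟩
      obtain ⟨i, rfl⟩ := hi
      exact mid_eq i
    · have hk : note = 127 + ((note - 127).toNat : Int) := by omega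
      have hfuel : (note - 127).toNat + 1 ≤ (note - 4).toNat := by omega
      simp only [aVal, bVal, if_neg (by omega : ¬ note < 5), scanRev_hi note h2]
      rw [hk] at hfuel ⊢
      rw [noteLoop_hi _ _ (by omega)]

-- ===== VERDICT (by name: the statement is the Claim_ definition above) =====
theorem note_map_f_minor_spec : Claim_equal_note_map_f_minor := by
  intro n _
  show note_map_f_minor n = note_map_f_minor_alt n
  simpa [note_map_f_minor, note_map_f_minor_alt, aVal, bVal] using val_eq (60 + n)
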